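-- pv_equiv track=rewrite | github.com/Nascar/kivy-designer | designer/uix/kv_lang_area.py | get_indentation
-- ===== SOURCE A (Python) =====
-- def get_indentation(string):
--     count = 0
--     for s in string:
--         if s == ' ':
--             count+=1
--         else:
--             return count
--
--     return count
-- ===== SOURCE B (Python) =====
-- def get_indentation(string):
--     return len(string) - len(string.lstrip(' '))
-- ===== Notes on version B (the rewrite author's own statement) =====
-- stated objective: idiomatic
-- what changed: Replaces the explicit per-character counting loop with length arithmetic: len(string) - len(string.lstrip(' ')), deriving the count by subtraction instead of an incrementing counter with an early return.
import Mathlib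
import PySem

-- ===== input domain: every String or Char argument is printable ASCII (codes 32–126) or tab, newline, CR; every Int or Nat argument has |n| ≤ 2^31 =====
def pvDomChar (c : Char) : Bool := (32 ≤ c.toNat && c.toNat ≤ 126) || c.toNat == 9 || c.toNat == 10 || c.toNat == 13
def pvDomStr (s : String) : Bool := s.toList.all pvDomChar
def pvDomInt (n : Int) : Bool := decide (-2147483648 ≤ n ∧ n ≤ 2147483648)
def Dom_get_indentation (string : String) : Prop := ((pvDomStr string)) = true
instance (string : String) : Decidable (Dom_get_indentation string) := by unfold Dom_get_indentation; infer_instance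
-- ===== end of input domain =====

-- B replaces A's counting loop by length arithmetic (len - len(lstrip(' '))); equivalence of return values.

-- ===== PORT A =====
-- the for-loop with its early 'return count' inside the 'else' branch
def getIndentGoA (cs : List Char) (count : Int) : Int :=
  match cs with
  | [] => count
  | c :: rest => if c = ' ' then getIndentGoA rest (count + 1) else count

def get_indentation (string : String) : Int :=
  getIndentGoA string.toList 0

-- ===== PORT B =====
-- len(string) - len(string.lstrip(' ')); lstrip(' ') ported by hand as dropWhile (· == ' '),
-- exact: Python's str.lstrip(' ') removes exactly the leading space characters
def get_indentation_alt (string : String) : Int :=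
  (string.toList.length : Int) - ((string.toList.dropWhile (fun c => c == ' ')).length : Int)

-- ===== PRECONDITION & SPEC =====
def Spec_get_indentation (string : String) (out : Int) : Prop := out = get_indentation_alt string
instance (string : String) (out : Int) : Decidable (Spec_get_indentation string out) := by unfold Spec_get_indentation; infer_instance

-- ===== CLAIM (what is proved, stated in full; the proofs are below) =====
def Claim_equal_get_indentation : Prop := ∀ (string : String), Dom_get_indentation string → Spec_get_indentation string (get_indentation string)

-- ===== LEMMAS AND PROOFS =====
theorem getIndentGoA_eq (cs : List Char) (count : Int) :
    getIndentGoA cs count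
      = count + ((cs.length : Int) - ((cs.dropWhile (fun c => c == ' ')).length : Int)) := by
  induction cs generalizing count with
  | nil => simp [getIndentGoA]
  | cons c rest ih =>
    by_cases h : c = ' '
    · simp [getIndentGoA, h, List.dropWhile, ih]
      ring
    · have hb : (c == ' ') = false := by simpa using h
      simp [getIndentGoA, h, List.dropWhile, hb]

-- ===== VERDICT (by name: the statement is the Claim_ definition above) =====
theorem get_indentation_spec : Claim_equal_get_indentation := by
  intro s _
  unfold Spec_get_indentation get_indentation get_indentation_alt
  rw [getIndentGoA_eq]
  ring
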